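-- pv_equiv track=rewrite | github.com/dvillano2/z3_points | structures.py | all_intermediate_lines
-- ===== SOURCE A (Python) =====
-- from typing import List
-- from typing import Tuple
--
-- def expand_index(index: int, prime: int) -> Tuple[int, int, int]:
--     z, yx = divmod(index, prime**2)
--     y, x = divmod(yx, prime)
--     return (x, y, z)
--
-- def shift_point(point: int, shift: int, prime: int) -> int:
--     "returns point + int, all in index form"
--     point_coords = expand_index(point, prime)
--     shift_coords = expand_index(shift, prime)
--     shifted_point = 0
--     for i, (point_coord, shift_coord) in enumerate(
--         zip(point_coords, shift_coords)
--     ):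
--         shifted_point += ((point_coord + shift_coord) % prime) * (prime**i)
--     return shifted_point
--
-- def intermediate_lines_through_origin(prime: int) -> List[List[int]]:
--     stereo_directions = [[0] for _ in range(prime)]
--     for x in range(prime):
--         stereo_directions[x] = [
--             (t * x) % prime + t * prime for t in range(prime)
--         ]
--     return stereo_directions
--
-- def intermediate_line_translates(
--     prime: int, line: List[int]
-- ) -> List[List[List[int]]]:
--     "Line direction is 0 in z coord and nonzero in y coord"
--     translates = [[[0] for _ in range(prime)] for _ in range(prime)]
--     for x in range(prime):
--         for z in range(prime):
--             translates[z][x] = [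
--                 shift_point(point, x + z * prime**2, prime) for point in line
--             ]
--     return translates
--
-- def all_intermediate_lines(prime: int) -> List[List[List[List[int]]]]:
--     intermediate_lines = intermediate_lines_through_origin(prime)
--     full_list: List[List[List[List[int]]]] = [[] for _ in range(prime)]
--     for x in range(prime):
--         full_list[x] = intermediate_line_translates(
--             prime, intermediate_lines[x]
--         )
--     return full_list
-- ===== SOURCE B (Python) =====
-- def all_intermediate_lines(prime: int):
--     return [
--         [
--             [
--                 [((t * x_line) % prime + x_shift) % prime + t * prime + z * prime**2
--                  for t in range(prime)]
--                 for x_shift in range(prime)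
--             ]
--             for z in range(prime)
--         ]
--         for x_line in range(prime)
--     ]
-- ===== Notes on version B (the rewrite author's own statement) =====
-- stated objective: simpler
-- what changed: B drops A's two-phase pipeline (origin-line table, then per-point index-decode/shift/reencode via expand_index and shift_point) and emits each entry directly with one closed-form modular-arithmetic expression in a single nested comprehension.
import Mathlib
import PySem

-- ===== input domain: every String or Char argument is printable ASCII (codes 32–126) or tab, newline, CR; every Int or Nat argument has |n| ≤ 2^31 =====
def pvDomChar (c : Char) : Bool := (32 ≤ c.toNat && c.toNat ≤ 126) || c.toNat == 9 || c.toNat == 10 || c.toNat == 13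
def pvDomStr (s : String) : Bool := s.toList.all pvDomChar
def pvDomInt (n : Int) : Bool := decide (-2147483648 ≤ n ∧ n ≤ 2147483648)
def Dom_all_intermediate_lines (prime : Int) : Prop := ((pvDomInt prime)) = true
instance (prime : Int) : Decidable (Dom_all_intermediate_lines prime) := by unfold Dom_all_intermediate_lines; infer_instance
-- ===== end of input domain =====

-- B fuses A's two phases (origin-line table, then per-point decode/shift/reencode) into one
-- direct closed-form nested comprehension; simpler, same asymptotic cost.

-- ===== PORT A =====
-- expand_index: divmod(index, prime**2) / divmod(yx, prime); A only calls it with prime ≥ 1,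
-- so the total floordiv/mod (exact for any nonzero divisor) transliterate Python's divmod here.
def expand_index (index : Int) (prime : Int) : Int × Int × Int :=
  let z := PySem.Int.floordiv index (prime ^ 2)
  let yx := PySem.Int.mod index (prime ^ 2)
  let y := PySem.Int.floordiv yx prime
  let x := PySem.Int.mod yx prime
  (x, y, z)

-- the loop over enumerate(zip(point_coords, shift_coords)); prime**i with i the nonnegative
-- enumerate index is ported as prime ^ i.toNat
def shift_point (point : Int) (shift : Int) (prime : Int) : Int :=
  let pc := expand_index point prime
  let sc := expand_index shift prime
  (PySem.List.enumerate [(pc.1, sc.1), (pc.2.1, sc.2.1), (pc.2.2, sc.2.2)]).foldl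
    (fun acc is =>
      acc + PySem.Int.mod (is.2.1 + is.2.2) prime * prime ^ is.1.toNat) 0

def intermediate_lines_through_origin (prime : Int) : List (List Int) :=
  let stereo_directions := (PySem.List.pyRange 0 prime 1).map (fun _ => [(0 : Int)])
  (PySem.List.pyRange 0 prime 1).foldl
    (fun sd x =>
      PySem.List.pySetD sd x
        ((PySem.List.pyRange 0 prime 1).map (fun t => PySem.Int.mod (t * x) prime + t * prime)))
    stereo_directions

def intermediate_line_translates (prime : Int) (line : List Int) : List (List (List Int)) :=
  let translates := (PySem.List.pyRange 0 prime 1).map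
    (fun _ => (PySem.List.pyRange 0 prime 1).map (fun _ => [(0 : Int)]))
  (PySem.List.pyRange 0 prime 1).foldl
    (fun tr x =>
      (PySem.List.pyRange 0 prime 1).foldl
        (fun tr z =>
          PySem.List.pySetD tr z
            (PySem.List.pySetD (PySem.List.pyGetD tr z [])
              x (line.map (fun point => shift_point point (x + z * prime ^ 2) prime))))
        tr)
    translates

def all_intermediate_lines (prime : Int) : List (List (List (List Int))) :=
  let intermediate_lines := intermediate_lines_through_origin prime
  let full_list := (PySem.List.pyRange 0 prime 1).map
    (fun _ => ([] : List (List (List Int))))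
  (PySem.List.pyRange 0 prime 1).foldl
    (fun fl x =>
      PySem.List.pySetD fl x
        (intermediate_line_translates prime (PySem.List.pyGetD intermediate_lines x [])))
    full_list

-- ===== PORT B =====
def all_intermediate_lines_alt (prime : Int) : List (List (List (List Int))) :=
  (PySem.List.pyRange 0 prime 1).map (fun x_line =>
    (PySem.List.pyRange 0 prime 1).map (fun z =>
      (PySem.List.pyRange 0 prime 1).map (fun x_shift =>
        (PySem.List.pyRange 0 prime 1).map (fun t =>
          PySem.Int.mod (PySem.Int.mod (t * x_line) prime + x_shift) prime
            + t * prime + z * prime ^ 2))))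

-- ===== PRECONDITION & SPEC =====
def Spec_all_intermediate_lines (prime : Int) (out : List (List (List (List Int)))) : Prop := out = all_intermediate_lines_alt prime
instance (prime : Int) (out : List (List (List (List Int)))) : Decidable (Spec_all_intermediate_lines prime out) := by unfold Spec_all_intermediate_lines; infer_instance

-- ===== CLAIM (what is proved, stated in full; the proofs are below) =====
def Claim_equal_all_intermediate_lines : Prop := ∀ (prime : Int), Dom_all_intermediate_lines prime → Spec_all_intermediate_lines prime (all_intermediate_lines prime)

-- ===== LEMMAS AND PROOFS =====

-- master fold/set lemma: a loop that sets slot i of a list to g i (current slot i),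
-- for i = 0 .. n-1 (n ≤ length), rewrites the processed prefix pointwise
lemma foldl_set_modify {α : Type} (g : Nat → α → α) (d : α) :
    ∀ (n : Nat) (init : List α), n ≤ init.length →
      (List.range n).foldl (fun l i => l.set i (g i (l.getD i d))) init
        = (List.range n).map (fun i => g i (init.getD i d)) ++ init.drop n := by
  intro n
  induction n with
  | zero => intro init _; simp
  | succ n ih =>
    intro init h
    have hn : n < init.length := by omega
    rw [List.range_succ, List.foldl_append, List.foldl_cons, List.foldl_nil,
      ih init (by omega)]
    have hlenmap : ((List.range n).map (fun i => g i (init.getD i d))).length = n := by simp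
    have hdrop : init.drop n = init[n] :: init.drop (n + 1) := by
      rw [List.drop_eq_getElem_cons hn]
    have hgetDn : init.getD n d = init[n] := by
      rw [List.getD_eq_getElem?_getD, List.getElem?_eq_getElem hn, Option.getD_some]
    have hgetD : ((List.range n).map (fun i => g i (init.getD i d)) ++ init.drop n).getD n d
        = init[n] := by
      rw [List.getD_eq_getElem?_getD, List.getElem?_append_right hlenmap.le,
        hlenmap, Nat.sub_self, hdrop, List.getElem?_cons_zero, Option.getD_some]
    rw [hgetD, hdrop, List.map_append, List.map_cons, List.map_nil]
    rw [List.set_append_right _ _ hlenmap.le]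
    rw [hlenmap, Nat.sub_self, List.set_cons_zero, hgetDn, List.append_assoc,
      List.singleton_append]

-- specialisation: destructively filling every slot of a length-n list is a map
lemma foldl_set_fill {α : Type} (f : Nat → α) (n : Nat) (init : List α)
    (h : init.length = n) :
    (List.range n).foldl (fun l i => l.set i (f i)) init = (List.range n).map f := by
  rw [foldl_set_modify (fun _i _ => f _i) (f 0) n init h.ge]
  simp [List.drop_eq_nil_of_le h.le]

lemma getD_map_range' {α : Type} (i0 : Nat → α) (n z : Nat) (d : α) (hz : z < n) :
    ((List.range n).map i0).getD z d = i0 z := by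
  rw [List.getD_eq_getElem?_getD, List.getElem?_map, List.getElem?_range hz]
  rfl

-- the x-loop of A's translate phase: each pass edits column x of every row z;
-- the whole loop is a map over the rows, each row folded independently
lemma outer_fold {β : Type} (v : Nat → Nat → β) (n : Nat) :
    ∀ (xs : List Nat) (i0 : Nat → List β),
      xs.foldl (fun tr x =>
          (List.range n).foldl (fun tr z => tr.set z ((tr.getD z []).set x (v x z))) tr)
        ((List.range n).map i0)
      = (List.range n).map (fun z => xs.foldl (fun row x => row.set x (v x z)) (i0 z)) := by
  intro xs
  induction xs with
  | nil => intro i0; simp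
  | cons x xs ih =>
    intro i0
    rw [List.foldl_cons]
    have hlen : ((List.range n).map i0).length = n := by simp
    rw [foldl_set_modify (fun z row => row.set x (v x z)) [] n _ hlen.ge]
    rw [List.drop_eq_nil_of_le hlen.le, List.append_nil]
    have hstep : (List.range n).map (fun z => (((List.range n).map i0).getD z []).set x (v x z))
        = (List.range n).map (fun z => (i0 z).set x (v x z)) := by
      apply List.map_congr_left
      intro z hz
      rw [getD_map_range' i0 n z [] (List.mem_range.mp hz)]
    rw [hstep, ih (fun z => (i0 z).set x (v x z))]
    simp only [List.foldl_cons]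

-- pyRange 0 p 1 as a mapped Nat range
lemma pyRange_zero_eq (p : Int) :
    PySem.List.pyRange 0 p 1 = (List.range p.toNat).map (Nat.cast : Nat → Int) := by
  rw [PySem.List.pyRange_one]
  simp only [zero_add, sub_zero]

-- characterisation of A's phase 1
lemma ilines_eq (p : Int) :
    intermediate_lines_through_origin p
      = (List.range p.toNat).map (fun (x : Nat) =>
          (PySem.List.pyRange 0 p 1).map
            (fun t => PySem.Int.mod (t * (x : Int)) p + t * p)) := by
  unfold intermediate_lines_through_origin
  rw [pyRange_zero_eq]
  rw [List.foldl_map]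
  simp only [PySem.List.pySetD_natCast]
  rw [foldl_set_fill _ p.toNat _ (by simp)]

-- characterisation of A's phase 2
lemma translates_eq (p : Int) (line : List Int) :
    intermediate_line_translates p line
      = (List.range p.toNat).map (fun (z : Nat) =>
          (List.range p.toNat).map (fun (x : Nat) =>
            line.map (fun point =>
              shift_point point ((x : Int) + (z : Int) * p ^ 2) p))) := by
  unfold intermediate_line_translates
  rw [pyRange_zero_eq]
  simp only [List.foldl_map, List.map_map, Function.comp_def,
    PySem.List.pySetD_natCast, PySem.List.pyGetD_natCast]
  rw [outer_fold (fun x z =>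
      line.map (fun point => shift_point point ((x : Int) + (z : Int) * p ^ 2) p))
    p.toNat (List.range p.toNat) (fun _ => (List.range p.toNat).map (fun _ => [(0 : Int)]))]
  apply List.map_congr_left
  intro z _
  rw [foldl_set_fill _ p.toNat _ (by simp)]

-- characterisation of A's top level
lemma all_eq (p : Int) :
    all_intermediate_lines p
      = (List.range p.toNat).map (fun (x : Nat) =>
          intermediate_line_translates p
            ((PySem.List.pyRange 0 p 1).map
              (fun t => PySem.Int.mod (t * (x : Int)) p + t * p))) := by
  unfold all_intermediate_lines
  rw [ilines_eq, pyRange_zero_eq]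
  rw [List.foldl_map]
  simp only [PySem.List.pySetD_natCast, PySem.List.pyGetD_natCast]
  rw [foldl_set_fill _ p.toNat _ (by simp)]
  apply List.map_congr_left
  intro x hx
  rw [getD_map_range' _ p.toNat x [] (List.mem_range.mp hx)]

-- decode/shift/reencode of a point of an origin line collapses to B's closed form
lemma shift_point_closed (p m t xs z : Int) (hp : 0 < p)
    (hm : 0 ≤ m) (hmp : m < p) (ht : 0 ≤ t) (htp : t < p)
    (hxs : 0 ≤ xs) (hxsp : xs < p) (hz : 0 ≤ z) (hzp : z < p) :
    shift_point (m + t * p) (xs + z * p ^ 2) p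
      = PySem.Int.mod (m + xs) p + t * p + z * p ^ 2 := by
  have hp2 : (0 : Int) < p ^ 2 := by positivity
  unfold shift_point expand_index
  simp only [PySem.List.enumerate, List.foldl_cons, List.foldl_nil]
  simp only [PySem.Int.floordiv_eq_ediv_of_pos hp, PySem.Int.mod_eq_emod_of_pos hp,
    PySem.Int.floordiv_eq_ediv_of_pos hp2, PySem.Int.mod_eq_emod_of_pos hp2]
  have h1 : (m + t * p) % p ^ 2 = m + t * p :=
    Int.emod_eq_of_lt (by nlinarith) (by nlinarith)
  have h2 : (m + t * p) / p = t := by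
    rw [Int.add_mul_ediv_right _ _ hp.ne', Int.ediv_eq_zero_of_lt hm hmp, zero_add]
  have h3 : (m + t * p) % p = m := by
    rw [mul_comm, Int.add_mul_emod_self_left, Int.emod_eq_of_lt hm hmp]
  have h4 : (xs + z * p ^ 2) / p ^ 2 = z := by
    rw [Int.add_mul_ediv_right _ _ hp2.ne', Int.ediv_eq_zero_of_lt hxs (by nlinarith), zero_add]
  have h5 : (xs + z * p ^ 2) % p ^ 2 = xs := by
    rw [mul_comm, Int.add_mul_emod_self_left, Int.emod_eq_of_lt hxs (by nlinarith)]
  have h6 : xs / p = 0 := Int.ediv_eq_zero_of_lt hxs hxsp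
  have h7 : xs % p = xs := Int.emod_eq_of_lt hxs hxsp
  rw [h1, h2, h3, h4, h5, h6, h7]
  have h8 : (t + 0) % p = t := by rw [add_zero, Int.emod_eq_of_lt ht htp]
  have h9 : ((m + t * p) / p ^ 2 + z) % p = z := by
    rw [Int.ediv_eq_zero_of_lt (by nlinarith) (by nlinarith), zero_add,
      Int.emod_eq_of_lt hz hzp]
  rw [h8, h9, (show Int.toNat 0 = 0 from rfl), (show ((0 : Int) + 1).toNat = 1 from rfl),
    (show ((0 : Int) + 1 + 1).toNat = 2 from rfl)]
  ring

-- ===== VERDICT (by name: the statement is the Claim_ definition above) =====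
theorem all_intermediate_lines_spec : Claim_equal_all_intermediate_lines := by
  intro p _
  unfold Spec_all_intermediate_lines all_intermediate_lines_alt
  rw [all_eq]
  rw [pyRange_zero_eq]
  simp only [List.map_map]
  apply List.map_congr_left
  intro x hx
  have hxn := List.mem_range.mp hx
  have hp : 0 < p := by omega
  rw [translates_eq]
  simp only [Function.comp_def, List.map_map]
  apply List.map_congr_left
  intro z hz
  have hzn := List.mem_range.mp hz
  apply List.map_congr_left
  intro xs hxs
  have hxsn := List.mem_range.mp hxs
  apply List.map_congr_left
  intro t ht
  have htn := List.mem_range.mp ht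
  have hcast : ∀ (k : Nat), k < p.toNat → (0 : Int) ≤ (k : Int) ∧ (k : Int) < p := by
    intro k hk
    constructor
    · exact_mod_cast Int.natCast_nonneg k
    · omega
  obtain ⟨hx0, hx1⟩ := hcast x hxn
  obtain ⟨hz0, hz1⟩ := hcast z hzn
  obtain ⟨hxs0, hxs1⟩ := hcast xs hxsn
  obtain ⟨ht0, ht1⟩ := hcast t htn
  have hm0 : 0 ≤ PySem.Int.mod ((t : Int) * (x : Int)) p := by
    rw [PySem.Int.mod_eq_emod_of_pos hp]
    exact Int.emod_nonneg _ hp.ne'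
  have hm1 : PySem.Int.mod ((t : Int) * (x : Int)) p < p := by
    rw [PySem.Int.mod_eq_emod_of_pos hp]
    exact Int.emod_lt_of_pos _ hp
  exact shift_point_closed p _ _ _ _ hp hm0 hm1 ht0 ht1 hxs0 hxs1 hz0 hz1
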